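-- pv_equiv track=rewrite | github.com/IoannisKaragiannis/LearnPython | books/ATBSWPython/chap6_proj.py | isTableValid
-- ===== SOURCE A (Python) =====
-- import sys, math
--
-- def isTableValid(data):
-- 	max = 0
-- 	min = math.inf
-- 	for row in range(len(data)):
-- 		if len(data[row]) > max:
-- 			max = len(data[row])
-- 		if len(data[row]) < min:
-- 			min = len(data[row])
-- 	if min == max:
-- 		return True
-- 	else:
-- 		return False
-- ===== SOURCE B (Python) =====
-- def isTableValid(data):
--     lengths = {len(row) for row in data}
--     return len(lengths) == 1
-- ===== Notes on version B (the rewrite author's own statement) =====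
-- stated objective: idiomatic
-- what changed: Replaces the index loop with min/max trackers by a one-pass set comprehension of distinct row lengths, returning whether exactly one length occurs (empty data naturally yields False, matching A's inf != 0).
import Mathlib
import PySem

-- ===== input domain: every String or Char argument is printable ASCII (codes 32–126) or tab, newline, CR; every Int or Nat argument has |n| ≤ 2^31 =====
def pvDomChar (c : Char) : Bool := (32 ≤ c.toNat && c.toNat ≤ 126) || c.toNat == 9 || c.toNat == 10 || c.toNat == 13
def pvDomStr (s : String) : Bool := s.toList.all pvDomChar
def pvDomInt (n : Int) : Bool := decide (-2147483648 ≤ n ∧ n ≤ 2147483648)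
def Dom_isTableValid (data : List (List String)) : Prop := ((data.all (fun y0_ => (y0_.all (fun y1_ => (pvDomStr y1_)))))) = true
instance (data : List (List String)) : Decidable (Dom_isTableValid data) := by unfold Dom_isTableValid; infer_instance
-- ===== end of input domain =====

-- B replaces the min/max-tracker loop by a set of distinct row lengths (idiomatic, same cost).

-- ===== PORT A =====
-- A's loop body: update the max tracker and the min tracker with length l.
-- math.inf is modelled as 'none' in the min tracker: every finite length compares < inf,
-- and 'min == max' is False while min is still inf — exact for this program.
def pvStep (st : Int × Option Int) (l : Int) : Int × Option Int :=
  (if l > st.1 then l else st.1,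
   match st.2 with
   | none => some l
   | some m => if l < m then some l else some m)

def isTableValid (data : List (List String)) : Bool :=
  let st := (PySem.List.pyRange 0 (data.length : Int) 1).foldl
    (fun (st : Int × Option Int) row => pvStep st ((PySem.List.pyGetD data row []).length : Int))
    ((0 : Int), (none : Option Int))
  match st.2 with
  | some m => m == st.1
  | none => false

-- ===== PORT B =====
def isTableValid_alt (data : List (List String)) : Bool :=
  let lengths : PySem.Set Int := PySem.Set.ofList (data.map (fun row => (row.length : Int)))
  lengths.length == 1

-- ===== PRECONDITION & SPEC =====
def Spec_isTableValid (data : List (List String)) (out : Bool) : Prop := out = isTableValid_alt data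
instance (data : List (List String)) (out : Bool) : Decidable (Spec_isTableValid data out) := by unfold Spec_isTableValid; infer_instance

-- ===== CLAIM (what is proved, stated in full; the proofs are below) =====
def Claim_equal_isTableValid : Prop := ∀ (data : List (List String)), Dom_isTableValid data → Spec_isTableValid data (isTableValid data)

-- ===== LEMMAS AND PROOFS =====

theorem pvStep_some (ls : List Int) : ∀ (mx m : Int),
    ls.foldl pvStep (mx, some m) = (ls.foldl max mx, some (ls.foldl min m)) := by
  induction ls with
  | nil => intro mx m; rfl
  | cons x t ih =>
    intro mx m
    have hx : (if x > mx then x else mx) = max mx x := by rw [max_def]; split_ifs <;> omega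
    have hm : (if x < m then some x else some m) = some (min m x) := by
      rw [min_def]; split_ifs <;> first | rfl | (congr 1; omega)
    simp only [List.foldl_cons, pvStep, hx, hm, ih]

theorem foldl_min_le (ls : List Int) : ∀ (a : Int),
    ls.foldl min a ≤ a ∧ ∀ y ∈ ls, ls.foldl min a ≤ y := by
  induction ls with
  | nil => intro a; simp
  | cons x t ih =>
    intro a
    have h := ih (min a x)
    refine ⟨le_trans h.1 (min_le_left _ _), ?_⟩
    intro y hy
    rcases List.mem_cons.mp hy with rfl | hy
    · exact le_trans h.1 (min_le_right _ _)
    · exact h.2 y hy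

theorem le_foldl_max (ls : List Int) : ∀ (a : Int),
    a ≤ ls.foldl max a ∧ ∀ y ∈ ls, y ≤ ls.foldl max a := by
  induction ls with
  | nil => intro a; simp
  | cons x t ih =>
    intro a
    have h := ih (max a x)
    refine ⟨le_trans (le_max_left _ _) h.1, ?_⟩
    intro y hy
    rcases List.mem_cons.mp hy with rfl | hy
    · exact le_trans (le_max_right _ _) h.1
    · exact h.2 y hy

theorem foldl_min_const (ls : List Int) : ∀ (a : Int), (∀ y ∈ ls, y = a) →
    ls.foldl min a = a ∧ ls.foldl max a = a := by
  induction ls with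
  | nil => intro a _; simp
  | cons x t ih =>
    intro a h
    have hx : x = a := h x (List.mem_cons_self)
    subst hx
    simpa using ih x (fun y hy => h y (List.mem_cons_of_mem _ hy))

theorem foldl_min_eq_max_iff (ls : List Int) (a : Int) :
    ls.foldl min a = ls.foldl max a ↔ ∀ y ∈ ls, y = a := by
  constructor
  · intro h y hy
    have h1 := foldl_min_le ls a
    have h2 := le_foldl_max ls a
    have := h1.2 y hy
    have := h2.2 y hy
    have := h1.1
    have := h2.1
    omega
  · intro h
    rw [(foldl_min_const ls a h).1, (foldl_min_const ls a h).2]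

theorem foldl_add_const (ls : List Int) (x : Int) (h : ∀ y ∈ ls, y = x) :
    ls.foldl PySem.Set.add [x] = [x] := by
  induction ls with
  | nil => rfl
  | cons y t ih =>
    have hy : y = x := h y (List.mem_cons_self)
    subst hy
    have : PySem.Set.add [y] y = [y] := by simp [PySem.Set.add, PySem.Set.contains]
    rw [List.foldl_cons, this]
    exact ih (fun z hz => h z (List.mem_cons_of_mem _ hz))

theorem set_len_one_iff (x : Int) (ls : List Int) :
    (PySem.Set.ofList (x :: ls)).length = 1 ↔ ∀ y ∈ ls, y = x := by
  constructor
  · intro h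
    obtain ⟨a, ha⟩ := List.length_eq_one_iff.mp h
    have hx : x ∈ PySem.Set.ofList (x :: ls) := by
      rw [PySem.Set.mem_ofList]; exact List.mem_cons_self
    rw [ha] at hx
    simp at hx
    subst hx
    intro y hy
    have : y ∈ PySem.Set.ofList (x :: ls) := by
      rw [PySem.Set.mem_ofList]; exact List.mem_cons_of_mem _ hy
    rw [ha] at this
    simpa using this
  · intro h
    have e : PySem.Set.ofList (x :: ls) = [x] := by
      rw [PySem.Set.ofList_eq_foldl, List.foldl_cons]
      have : PySem.Set.add [] x = [x] := rfl
      rw [this]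
      exact foldl_add_const ls x h
    rw [e]
    rfl

-- ===== VERDICT (by name: the statement is the Claim_ definition above) =====
theorem isTableValid_spec : Claim_equal_isTableValid := by
  intro data _
  unfold Spec_isTableValid isTableValid isTableValid_alt
  rw [PySem.List.foldl_pyRange_zero_pyGetD' data ([] : List String)
      (fun (st : Int × Option Int) r => pvStep st (r.length : Int)) ((0 : Int), (none : Option Int))]
  cases data with
  | nil => rfl
  | cons r t =>
    rw [List.foldl_cons]
    have h0 : pvStep ((0 : Int), (none : Option Int)) (r.length : Int)
        = ((r.length : Int), some (r.length : Int)) := by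
      simp only [pvStep]
      congr 1
      split_ifs <;> omega
    rw [h0, ← List.foldl_map (f := fun r : List String => (r.length : Int)) (g := pvStep), pvStep_some]
    simp only [List.map_cons]
    rw [Bool.eq_iff_iff]
    simp only [beq_iff_eq]
    rw [foldl_min_eq_max_iff, set_len_one_iff]
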